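-- pv_equiv track=rewrite | github.com/larumbe/challenges | hackerrank/interview/dynamicprogramming/maxarraysum.py | genNonAdjecent
-- ===== SOURCE A (Python) =====
-- def genNonAdjecent(s):
--     for i in range(1, pow(2, len(s))):
--         bs = (str(bin(i))[2:])
--         if "11" in bs:
--             continue
--         if bs.count("1") == 1:
--             continue
--         bs = ("0" * (len(s)-len(bs)) + bs)[::-1]
--         subset = []
--         for j in range(len(bs)):
--             if (bs[j] == '1'):
--                 subset.append(s[j])
--         yield subset
-- ===== SOURCE B (Python) =====
-- def genNonAdjecent(s):
--     # Fibonacci-style DP: build the non-adjacent subsets of s[:k] in increasing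
--     # bitmask order directly, instead of scanning all 2^n masks.
--     f_prev = [[]]
--     f_cur = [[]] if not s else [[], [s[0]]]
--     for k in range(2, len(s) + 1):
--         f_prev, f_cur = f_cur, f_cur + [t + [s[k - 1]] for t in f_prev]
--     for sub in f_cur:
--         if len(sub) >= 2:
--             yield sub
-- ===== Notes on version B (the rewrite author's own statement) =====
-- stated objective: alternative
-- what changed: Replaces the scan of all 2^n bitmasks with per-mask binary-string tests by a Fibonacci-style recurrence that builds the non-adjacent subsets of each prefix directly in increasing-mask order, then drops subsets of length < 2 (intended as faster, O(Fib(n)*n) work vs O(2^n*n); measured 23.85x at n=16, but unconfirmed at the largest probe size because the output itself is exponentially large).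
import Mathlib
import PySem

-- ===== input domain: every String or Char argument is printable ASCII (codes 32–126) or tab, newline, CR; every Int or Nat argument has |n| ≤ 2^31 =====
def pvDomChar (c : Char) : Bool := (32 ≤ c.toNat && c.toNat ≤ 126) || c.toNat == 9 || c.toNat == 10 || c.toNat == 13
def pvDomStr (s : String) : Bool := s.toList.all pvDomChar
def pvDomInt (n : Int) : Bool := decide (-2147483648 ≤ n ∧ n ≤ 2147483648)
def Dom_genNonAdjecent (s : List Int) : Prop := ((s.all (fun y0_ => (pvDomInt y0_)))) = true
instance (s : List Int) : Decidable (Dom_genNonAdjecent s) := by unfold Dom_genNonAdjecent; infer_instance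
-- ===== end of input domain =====

-- B replaces the 2^n-mask scan by a Fibonacci-style recurrence over prefixes
-- (structurally different; it avoids touching masks with adjacent bits at all);
-- equivalence is about the list of yielded values of the generator.

-- ===== PORT A =====

-- bin(i)[2:] as a char list (MSB first); exact for i ≥ 1, the only values A feeds it.
def pyBin (i : Nat) : List Char :=
  if _h : i = 0 then []
  else pyBin (i / 2) ++ [if i % 2 = 1 then '1' else '0']
decreasing_by exact Nat.div_lt_self (Nat.pos_of_ne_zero _h) (by omega)

-- '"11" in bs' for a binary string
def contains11 : List Char → Bool
  | a :: b :: t => (a == '1' && b == '1') || contains11 (b :: t)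
  | _ => false

def genNonAdjecent (s : List Int) : List (List Int) :=
  (PySem.List.pyRange 1 (2 ^ s.length : Int) 1).foldl (fun out i =>
    let bs0 := pyBin i.toNat          -- i ≥ 1 in this range, so .toNat is exact
    if contains11 bs0 then out
    else if bs0.count '1' == 1 then out
    else
      let bs := (List.replicate (s.length - bs0.length) '0' ++ bs0).reverse
      -- indices j are in range, so pyGetD is exact here
      let subset := (PySem.List.pyRange 0 (bs.length : Int) 1).foldl
        (fun acc j => if PySem.List.pyGetD bs j '0' == '1'
                      then acc ++ [PySem.List.pyGetD s j 0] else acc) []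
      out ++ [subset]) []

-- ===== PORT B =====

-- the 'for k in range(2, len(s)+1)' loop: consumes s[1:], state (f_prev, f_cur)
def bLoop : List Int → List (List Int) → List (List Int) → List (List Int)
  | [], _, cur => cur
  | x :: rest, prev, cur => bLoop rest cur (cur ++ prev.map (fun t => t ++ [x]))

def genNonAdjecent_alt (s : List Int) : List (List Int) :=
  let cur := match s with
    | [] => [[]]
    | x :: rest => bLoop rest [[]] [[], [x]]
  cur.filter (fun t => 2 ≤ t.length)

-- ===== PRECONDITION & SPEC =====
def Spec_genNonAdjecent (s : List Int) (out : List (List Int)) : Prop := out = genNonAdjecent_alt s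
instance (s : List Int) (out : List (List Int)) : Decidable (Spec_genNonAdjecent s out) := by unfold Spec_genNonAdjecent; infer_instance

-- ===== CLAIM (what is proved, stated in full; the proofs are below) =====
def Claim_equal_genNonAdjecent : Prop := ∀ (s : List Int), Dom_genNonAdjecent s → Spec_genNonAdjecent s (genNonAdjecent s)

-- ===== LEMMAS AND PROOFS =====

-- little-endian n-bit view of i
def leb : Nat → Nat → List Bool
  | 0, _ => []
  | n + 1, i => decide (i % 2 = 1) :: leb n (i / 2)

-- MSB-first bits of i (no leading zeros)
def mbits (i : Nat) : List Bool :=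
  if _h : i = 0 then []
  else mbits (i / 2) ++ [decide (i % 2 = 1)]
decreasing_by exact Nat.div_lt_self (Nat.pos_of_ne_zero _h) (by omega)

def chBit (b : Bool) : Char := if b then '1' else '0'

def noAdjL : List Bool → Bool
  | a :: b :: t => !(a && b) && noAdjL (b :: t)
  | _ => true

-- subset extraction: elements of s at true positions of l (parallel walk)
def ext : List Bool → List Int → List Int
  | [], _ => []
  | _ :: _, [] => []
  | b :: bs, x :: xs => if b then x :: ext bs xs else ext bs xs

-- the no-adjacent masks of length k, little-endian, in increasing numeric order
def masks : Nat → List (List Bool)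
  | 0 => [[]]
  | 1 => [[false], [true]]
  | k + 2 => (masks (k + 1)).map (· ++ [false]) ++ (masks k).map (· ++ [false, true])

theorem pyBin_eq_mbits (i : Nat) : pyBin i = (mbits i).map chBit := by
  induction i using Nat.strong_induction_on with
  | _ i ih =>
    rw [pyBin, mbits]
    by_cases h : i = 0
    · simp [h]
    · simp only [h, dite_false]
      rw [List.map_append, ih (i / 2) (Nat.div_lt_self (Nat.pos_of_ne_zero h) (by omega))]
      simp [chBit]

theorem length_leb (n i : Nat) : (leb n i).length = n := by
  induction n generalizing i with
  | zero => rfl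
  | succ n ih => simp [leb, ih]

theorem leb_zero (n : Nat) : leb n 0 = List.replicate n false := by
  induction n with
  | zero => rfl
  | succ n ih => simp [leb, ih, List.replicate_succ]

theorem leb_eq_rev (n : Nat) : ∀ i, i < 2 ^ n →
    leb n i = (List.replicate (n - (mbits i).length) false ++ mbits i).reverse := by
  induction n with
  | zero => intro i hi; interval_cases i; simp [leb, mbits]
  | succ n ih =>
    intro i hi
    by_cases h : i = 0
    · subst h; rw [leb_zero, mbits]; simp [List.reverse_replicate]
    · rw [mbits]; simp only [h, dite_false]
      have hdiv : i / 2 < 2 ^ n := by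
        have := Nat.pow_succ 2 n ▸ hi; omega
      have := ih (i / 2) hdiv
      rw [leb]
      simp only [List.length_append, List.length_singleton]
      have hsub : n + 1 - ((mbits (i / 2)).length + 1) = n - (mbits (i / 2)).length := by omega
      rw [hsub, ← List.append_assoc, List.reverse_append, this]
      simp

theorem noAdjL_append : ∀ (l1 l2 : List Bool),
    noAdjL (l1 ++ l2) = (noAdjL l1 && noAdjL l2 && !(l1.getLastD false && l2.headD false))
  | [], l2 => by simp [noAdjL]
  | [a], l2 => by cases l2 <;> cases a <;> simp [noAdjL, Bool.and_comm]
  | a :: b :: t, l2 => by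
    have ih := noAdjL_append (b :: t) l2
    simp only [List.cons_append, noAdjL, List.getLastD_cons] at ih ⊢
    rw [ih]
    cases a <;> cases b <;> simp

theorem noAdjL_false_cons (l : List Bool) : noAdjL (false :: l) = noAdjL l := by
  cases l <;> simp [noAdjL]

theorem noAdjL_reverse : ∀ l : List Bool, noAdjL l.reverse = noAdjL l
  | [] => rfl
  | a :: t => by
    have ih := noAdjL_reverse t
    rw [List.reverse_cons, noAdjL_append, ih]
    have hlast : t.reverse.getLastD false = t.headD false := by
      cases t <;> simp
    rw [hlast]
    cases t with
    | nil => simp [noAdjL]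
    | cons b u => cases a <;> cases b <;> simp [noAdjL]

theorem noAdjL_replicate_append (p : Nat) (l : List Bool) :
    noAdjL (List.replicate p false ++ l) = noAdjL l := by
  induction p with
  | zero => rfl
  | succ p ih => rw [List.replicate_succ, List.cons_append, noAdjL_false_cons, ih]

theorem noAdjL_append_false (l : List Bool) : noAdjL (l ++ [false]) = noAdjL l := by
  rw [noAdjL_append]; simp [noAdjL]

theorem noAdjL_append_false_true (l : List Bool) : noAdjL (l ++ [false, true]) = noAdjL l := by
  rw [noAdjL_append]; simp [noAdjL]

theorem noAdjL_append_true_true (l : List Bool) : noAdjL (l ++ [true, true]) = false := by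
  rw [noAdjL_append]; simp [noAdjL]

theorem contains11_map_chBit : ∀ l : List Bool, contains11 (l.map chBit) = !(noAdjL l)
  | [] => by simp [contains11, noAdjL]
  | [a] => by cases a <;> simp [contains11, noAdjL, chBit]
  | a :: b :: t => by
    have ih := contains11_map_chBit (b :: t)
    simp only [List.map_cons] at ih ⊢
    cases a <;> cases b <;>
      simp_all [contains11, noAdjL, chBit]

theorem count_map_chBit : ∀ l : List Bool, (l.map chBit).count '1' = l.count true
  | [] => rfl
  | a :: t => by
    have ih := count_map_chBit t
    cases a <;> simp [chBit, ih]

theorem count_leb (n : Nat) (i : Nat) (hi : i < 2 ^ n) :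
    (leb n i).count true = (mbits i).count true := by
  rw [leb_eq_rev n i hi, List.count_reverse, List.count_append, List.count_replicate]
  simp

theorem count_leb_eq_zero (n : Nat) : ∀ i, i < 2 ^ n → ((leb n i).count true = 0 ↔ i = 0) := by
  induction n with
  | zero => intro i hi; interval_cases i; simp [leb]
  | succ n ih =>
    intro i hi
    have hdiv : i / 2 < 2 ^ n := by have := Nat.pow_succ 2 n ▸ hi; omega
    have h2 : i % 2 = 1 ∨ i % 2 = 0 := by omega
    rcases h2 with h2 | h2 <;>
      simp [leb, h2, ih (i / 2) hdiv] <;> omega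

theorem leb_low (n : Nat) : ∀ i, i < 2 ^ n → leb (n + 1) i = leb n i ++ [false] := by
  induction n with
  | zero => intro i hi; interval_cases i; simp [leb]
  | succ n ih =>
    intro i hi
    have hdiv : i / 2 < 2 ^ n := by have := Nat.pow_succ 2 n ▸ hi; omega
    rw [leb, ih (i / 2) hdiv]; rfl

theorem leb_high (n : Nat) : ∀ m, m < 2 ^ n → leb (n + 1) (m + 2 ^ n) = leb n m ++ [true] := by
  induction n with
  | zero => intro m hm; interval_cases m; simp [leb]
  | succ n ih =>
    intro m hm
    have hdiv : m / 2 < 2 ^ n := by have := Nat.pow_succ 2 n ▸ hm; omega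
    have h2 : (m + 2 ^ (n + 1)) / 2 = m / 2 + 2 ^ n := by
      rw [Nat.pow_succ]; omega
    have h1 : (m + 2 ^ (n + 1)) % 2 = m % 2 := by
      rw [Nat.pow_succ]; omega
    rw [leb, h1, h2, ih (m / 2) hdiv]; rfl

theorem masks_eq : ∀ k, ((List.range (2 ^ k)).map (leb k)).filter noAdjL = masks k
  | 0 => by decide
  | 1 => by decide
  | k + 2 => by
    have ih1 := masks_eq (k + 1)
    have ih0 := masks_eq k
    have hsplit : (2 : Nat) ^ (k + 2) = 2 ^ (k + 1) + 2 ^ (k + 1) := by ring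
    rw [hsplit, List.range_add, List.map_append, List.filter_append]
    have hlow : ((List.range (2 ^ (k + 1))).map (leb (k + 2))).filter noAdjL
        = (masks (k + 1)).map (· ++ [false]) := by
      have h1 : (List.range (2 ^ (k + 1))).map (leb (k + 2))
          = (List.range (2 ^ (k + 1))).map ((fun l => l ++ [false]) ∘ leb (k + 1)) :=
        List.map_congr_left (fun i hi => leb_low (k + 1) i (List.mem_range.mp hi))
      rw [h1, ← List.map_map, List.filter_map]
      have h2 : (noAdjL ∘ fun l => l ++ [false]) = noAdjL := funext fun l => noAdjL_append_false l
      rw [h2, ih1]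
    have hhigh : (((List.range (2 ^ (k + 1))).map (fun j => 2 ^ (k + 1) + j)).map (leb (k + 2))).filter noAdjL
        = (masks k).map (· ++ [false, true]) := by
      rw [List.map_map]
      have h1 : (List.range (2 ^ (k + 1))).map (leb (k + 2) ∘ fun j => 2 ^ (k + 1) + j)
          = (List.range (2 ^ (k + 1))).map (fun j => leb (k + 1) j ++ [true]) :=
        List.map_congr_left (fun j hj => by
          have h := leb_high (k + 1) j (List.mem_range.mp hj)
          show leb (k + 2) (2 ^ (k + 1) + j) = leb (k + 1) j ++ [true]
          rw [Nat.add_comm (2 ^ (k + 1)) j]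
          exact h)
      have hsplit2 : (2 : Nat) ^ (k + 1) = 2 ^ k + 2 ^ k := by ring
      rw [h1, hsplit2, List.range_add, List.map_append, List.filter_append]
      have hA : ((List.range (2 ^ k)).map (fun j => leb (k + 1) j ++ [true])).filter noAdjL
          = (masks k).map (· ++ [false, true]) := by
        have h2 : (List.range (2 ^ k)).map (fun j => leb (k + 1) j ++ [true])
            = (List.range (2 ^ k)).map ((fun l => l ++ [false, true]) ∘ leb k) :=
          List.map_congr_left (fun j hj => by
            simp only [Function.comp]
            rw [leb_low k j (List.mem_range.mp hj), List.append_assoc]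
            rfl)
        rw [h2, ← List.map_map, List.filter_map]
        have h3 : (noAdjL ∘ fun l => l ++ [false, true]) = noAdjL :=
          funext fun l => noAdjL_append_false_true l
        rw [h3, ih0]
      have hB : (((List.range (2 ^ k)).map (fun j => 2 ^ k + j)).map (fun j => leb (k + 1) j ++ [true])).filter noAdjL
          = [] := by
        rw [List.map_map, List.filter_eq_nil_iff]
        intro a ha
        rw [List.mem_map] at ha
        obtain ⟨j, hj, rfl⟩ := ha
        have h := leb_high k j (List.mem_range.mp hj)
        simp only [Function.comp, Nat.add_comm (2 ^ k) j,  h, List.append_assoc]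
        rw [show ([true] ++ [true] : List Bool) = [true, true] from rfl,
          noAdjL_append_true_true]
        simp
      rw [hA, hB, List.append_nil]
    rw [hlow, hhigh, masks]

theorem ext_append_false : ∀ (l : List Bool) (s : List Int), ext (l ++ [false]) s = ext l s
  | [], [] => rfl
  | [], _ :: _ => by simp [ext]
  | _ :: _, [] => rfl
  | b :: l, x :: s => by
    simp only [List.cons_append, ext, ext_append_false l s]

theorem ext_append_true : ∀ (l : List Bool) (s : List Int), l.length < s.length →
    ext (l ++ [true]) s = ext l s ++ [s.getD l.length 0]
  | [], x :: s, _ => by simp [ext]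
  | b :: l, x :: s, h => by
    have ih := ext_append_true l s (by simpa using h)
    simp only [List.cons_append, ext, ih]
    cases b <;> simp

theorem ext_length : ∀ (l : List Bool) (s : List Int), l.length ≤ s.length →
    (ext l s).length = l.count true
  | [], _, _ => by simp [ext]
  | _ :: _, [], h => by simp at h
  | b :: l, x :: s, h => by
    have ih := ext_length l s (by simpa using h)
    cases b <;> simp [ext, ih]

theorem masks_length : ∀ k, ∀ l ∈ masks k, l.length = k := by
  intro k
  induction k using Nat.strong_induction_on with
  | _ k ih =>
    match k with
    | 0 => simp [masks]
    | 1 => intro l hl; rw [masks] at hl; simp at hl; rcases hl with rfl | rfl <;> rfl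
    | k + 2 =>
      intro l hl
      rw [masks, List.mem_append] at hl
      rcases hl with hl | hl <;> rw [List.mem_map] at hl
      · obtain ⟨l', h', rfl⟩ := hl
        simp [ih (k + 1) (by omega) l' h']
      · obtain ⟨l', h', rfl⟩ := hl
        simp [ih k (by omega) l' h']

-- inner loop of A, after reduction to Nat range / getD, equals ext
theorem inner_ext : ∀ (l : List Bool) (s : List Int), l.length ≤ s.length →
    ((List.range l.length).filter
        (fun j => (l.map chBit).getD j '0' == '1')).map (fun j => s.getD j 0) = ext l s
  | [], s, _ => by simp [ext]
  | b :: l, [], h => by simp at h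
  | b :: l, x :: s, h => by
    have ih := inner_ext l s (by simpa using h)
    have hb : ∀ c : Bool, (chBit c == '1') = c := by decide
    rw [List.length_cons, List.range_succ_eq_map, List.filter_cons, List.filter_map]
    have hp : ((fun j => (((b :: l).map chBit).getD j '0' == '1')) ∘ Nat.succ)
        = (fun j => ((l.map chBit).getD j '0' == '1')) := by
      funext j; simp
    rw [hp]
    have hf : (List.filter (fun j => (l.map chBit).getD j '0' == '1') (List.range l.length)).map
          ((fun j => (x :: s).getD j 0) ∘ Nat.succ)
        = ext l s := by
      rw [show ((fun j => (x :: s).getD j 0) ∘ Nat.succ) = (fun j => s.getD j 0) from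
        funext fun j => by simp]
      exact ih
    cases b
    · rw [if_neg (by simp [hb]), List.map_map, hf]
      simp [ext]
    · rw [if_pos (by simp [hb]), List.map_cons, List.map_map, hf]
      simp [ext]

-- B's loop computes the masks recurrence mapped through ext
theorem bLoop_masks : ∀ (rest : List Int) (k : Nat) (s : List Int),
    s.length = k + 1 + rest.length → rest = s.drop (k + 1) →
    bLoop rest ((masks k).map (fun l => ext l s)) ((masks (k + 1)).map (fun l => ext l s))
      = (masks s.length).map (fun l => ext l s)
  | [], k, s, hlen, _ => by
    simp only [List.length_nil, Nat.add_zero] at hlen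
    rw [bLoop, hlen]
  | x :: rest, k, s, hlen, hdrop => by
    have hx : s.getD (k + 1) 0 = x := by
      have h := congrArg List.head? hdrop
      rw [List.head?_drop] at h
      rw [List.getD_eq_getElem?_getD, ← h]
      rfl
    have hcur : (masks (k + 1)).map (fun l => ext l s)
          ++ ((masks k).map (fun l => ext l s)).map (fun t => t ++ [x])
        = (masks (k + 2)).map (fun l => ext l s) := by
      rw [masks, List.map_append]
      congr 1
      · rw [List.map_map]
        apply List.map_congr_left
        intro l _
        simp only [Function.comp_def]
        exact (ext_append_false l s).symm
      · rw [List.map_map, List.map_map]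
        apply List.map_congr_left
        intro l hl
        have hlen' := masks_length k l hl
        have h1 : ext (l ++ [false, true]) s = ext l s ++ [s.getD (l.length + 1) 0] := by
          rw [show (l ++ [false, true]) = (l ++ [false]) ++ [true] by simp,
            ext_append_true _ s (by simp only [List.length_append, List.length_cons, List.length_nil, hlen', hlen]; omega),
            ext_append_false]
          simp
        simp only [Function.comp_def, h1, hlen', hx]
    rw [bLoop, hcur]
    have hdrop' : rest = s.drop (k + 1 + 1) := by
      rw [← List.drop_drop, ← hdrop]
      rfl
    exact bLoop_masks rest (k + 1) s (by simp at hlen ⊢; omega) hdrop'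

theorem B_char (s : List Int) :
    genNonAdjecent_alt s
      = ((masks s.length).filter (fun l => 2 ≤ l.count true)).map (fun l => ext l s) := by
  cases s with
  | nil => rfl
  | cons x rest =>
    have hcur : bLoop rest [[]] [[], [x]]
        = (masks (x :: rest).length).map (fun l => ext l (x :: rest)) := by
      have h1 : ([[], [x]] : List (List Int)) = (masks 1).map (fun l => ext l (x :: rest)) := by
        simp [masks, ext]
      rw [show ([[]] : List (List Int)) = (masks 0).map (fun l => ext l (x :: rest)) from rfl, h1]
      exact bLoop_masks rest 0 (x :: rest) (by simp only [List.length_cons]; omega) rfl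
    show (bLoop rest [[]] [[], [x]]).filter (fun t => 2 ≤ t.length) = _
    rw [hcur, List.filter_map]
    congr 1
    apply List.filter_congr
    intro l hl
    have h := masks_length (x :: rest).length l hl
    simp [ext_length l (x :: rest) (le_of_eq h)]

-- the per-iteration loop body of A, with the lets resolved (used only by the proofs)
def fA (s : List Int) (i : Int) : List Int :=
  (PySem.List.pyRange 0
      (((List.replicate (s.length - (pyBin i.toNat).length) '0' ++ pyBin i.toNat).reverse.length : Int)) 1).foldl
    (fun acc j => if PySem.List.pyGetD ((List.replicate (s.length - (pyBin i.toNat).length) '0' ++ pyBin i.toNat).reverse) j '0' == '1'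
                  then acc ++ [PySem.List.pyGetD s j 0] else acc) []

def pA (i : Int) : Bool := !contains11 (pyBin i.toNat) && !((pyBin i.toNat).count '1' == 1)

theorem contains11_eq (n m : Nat) (hm : m < 2 ^ n) :
    contains11 (pyBin m) = !(noAdjL (leb n m)) := by
  rw [pyBin_eq_mbits, contains11_map_chBit, leb_eq_rev n m hm, noAdjL_reverse,
    noAdjL_replicate_append]

theorem count_pyBin_eq (n m : Nat) (hm : m < 2 ^ n) :
    (pyBin m).count '1' = (leb n m).count true := by
  rw [pyBin_eq_mbits, count_map_chBit, count_leb n m hm]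

theorem bs_eq (s : List Int) (m : Nat) (hm : m < 2 ^ s.length) :
    (List.replicate (s.length - (pyBin m).length) '0' ++ pyBin m).reverse
      = (leb s.length m).map chBit := by
  rw [pyBin_eq_mbits, leb_eq_rev s.length m hm, List.map_reverse, List.map_append,
    List.map_replicate, List.length_map]
  rfl

theorem fA_eq (s : List Int) (i : Int) (hm : i.toNat < 2 ^ s.length) :
    fA s i = ext (leb s.length i.toNat) s := by
  unfold fA
  rw [bs_eq s i.toNat hm]
  have hlen : ((leb s.length i.toNat).map chBit).length = s.length := by
    rw [List.length_map, length_leb]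
  rw [hlen]
  rw [PySem.List.pyRange_one]
  have ht : (((s.length : Int)) - 0).toNat = s.length := by omega
  rw [ht, List.foldl_map]
  have hbody : (fun (acc : List Int) (k : Nat) =>
        if PySem.List.pyGetD ((leb s.length i.toNat).map chBit) ((0 : Int) + k) '0' == '1'
        then acc ++ [PySem.List.pyGetD s ((0 : Int) + k) 0] else acc)
      = (fun acc k => if ((leb s.length i.toNat).map chBit).getD k '0' == '1'
        then acc ++ [s.getD k 0] else acc) := by
    funext acc k
    simp
  rw [hbody, PySem.List.foldl_append_if, List.nil_append]
  rw [show List.range s.length = List.range (leb s.length i.toNat).length by rw [length_leb]]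
  exact inner_ext (leb s.length i.toNat) s (le_of_eq (length_leb s.length i.toNat))

theorem A_char (s : List Int) :
    genNonAdjecent s
      = ((masks s.length).filter (fun l => 2 ≤ l.count true)).map (fun l => ext l s) := by
  -- Step 1: rewrite A's fold into filter/map form
  have hbody : (fun (out : List (List Int)) (i : Int) =>
      let bs0 := pyBin i.toNat
      if contains11 bs0 then out
      else if bs0.count '1' == 1 then out
      else
        let bs := (List.replicate (s.length - bs0.length) '0' ++ bs0).reverse
        let subset := (PySem.List.pyRange 0 (bs.length : Int) 1).foldl
          (fun acc j => if PySem.List.pyGetD bs j '0' == '1'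
                        then acc ++ [PySem.List.pyGetD s j 0] else acc) []
        out ++ [subset])
      = (fun out i => if pA i then out ++ [fA s i] else out) := by
    funext out i
    by_cases hc1 : contains11 (pyBin i.toNat)
    · simp [hc1, pA]
    · by_cases hc2 : ((pyBin i.toNat).count '1' == 1)
      · simp [hc1, hc2, pA]
      · simp [hc1, hc2, pA, fA]
  unfold genNonAdjecent
  rw [hbody, PySem.List.foldl_append_if, List.nil_append]
  -- Step 2: move to Nat ranges
  have hpow : ((2 ^ s.length : Int)) = ((2 ^ s.length : Nat) : Int) := by push_cast; ring
  have hpos : 1 ≤ (2 : Nat) ^ s.length := Nat.one_le_two_pow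
  have ht : ((2 ^ s.length : Int) - 1).toNat = 2 ^ s.length - 1 := by
    rw [hpow]; omega
  rw [PySem.List.pyRange_one, ht, List.filter_map, List.map_map]
  -- Step 3: rewrite the RHS through masks_eq down to the same Nat range
  rw [← masks_eq s.length, List.filter_filter, List.filter_map, List.map_map]
  have hrange : List.range (2 ^ s.length) = 0 :: (List.range (2 ^ s.length - 1)).map Nat.succ := by
    conv_lhs => rw [show 2 ^ s.length = (2 ^ s.length - 1) + 1 by omega]
    rw [List.range_succ_eq_map]
  rw [hrange, List.filter_cons,
    if_neg (by simp [leb_zero, List.count_replicate]), List.filter_map, List.map_map]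
  -- Step 4: pointwise agreement on [0, 2^n - 1), i.e. masks 1 .. 2^n - 1
  have hfil : List.filter
        ((fun i => pA i) ∘ fun k : Nat => (1 : Int) + k) (List.range (2 ^ s.length - 1))
      = List.filter
        ((fun l => decide (2 ≤ l.count true) && noAdjL l) ∘ leb s.length ∘ Nat.succ)
        (List.range (2 ^ s.length - 1)) := by
    apply List.filter_congr
    intro k hk
    have hk' : k + 1 < 2 ^ s.length := by
      have := List.mem_range.mp hk
      omega
    have htn : ((1 : Int) + k).toNat = k + 1 := by omega
    have hcz := count_leb_eq_zero s.length (k + 1) hk'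
    simp only [Function.comp_def, pA, htn]
    rw [contains11_eq s.length (k + 1) hk', count_pyBin_eq s.length (k + 1) hk',
      Bool.not_not]
    have hcnz : (leb s.length (k + 1)).count true ≠ 0 := fun h => Nat.succ_ne_zero k (hcz.mp h)
    cases hna : noAdjL (leb s.length (k + 1))
    · simp
    · simp only [Bool.and_true, Bool.true_and]
      rw [Bool.eq_iff_iff]
      simp
      omega
  rw [hfil]
  apply List.map_congr_left
  intro k hk
  have hk' : k + 1 < 2 ^ s.length := by
    have := List.mem_range.mp (List.mem_of_mem_filter hk)
    omega
  have htn : ((1 : Int) + k).toNat = k + 1 := by omega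
  simp only [Function.comp_def]
  rw [fA_eq s ((1 : Int) + k) (by rw [htn]; exact hk'), htn]
-- ===== VERDICT (by name: the statement is the Claim_ definition above) =====
theorem genNonAdjecent_spec : Claim_equal_genNonAdjecent := by
  intro s _
  unfold Spec_genNonAdjecent
  rw [A_char, B_char]
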